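-- pv_equiv track=rewrite | github.com/tian0605/test_new_project_for_companyA | myems-api/core/menu.py | get_visible_menu_ids
-- ===== SOURCE A (Python) =====
-- def get_visible_menu_ids(rows_menus, menu_route_scope):
--     if menu_route_scope is None:
--         return {row[0] for row in rows_menus} if rows_menus else set()
--
--     menu_by_id = dict()
--     for row in rows_menus:
--         menu_by_id[row[0]] = row
--
--     visible_menu_ids = set()
--     for row in rows_menus:
--         menu_id = row[0]
--         route = row[2]
--         parent_menu_id = row[3]
--         if route in menu_route_scope:
--             visible_menu_ids.add(menu_id)
--             while parent_menu_id is not None and parent_menu_id in menu_by_id and parent_menu_id not in visible_menu_ids: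
--                 visible_menu_ids.add(parent_menu_id)
--                 parent_menu_id = menu_by_id[parent_menu_id][3]
--
--     return visible_menu_ids
-- ===== SOURCE B (Python) =====
-- def get_visible_menu_ids(rows_menus, menu_route_scope):
--     if menu_route_scope is None:
--         return {row[0] for row in rows_menus}
--
--     menu_by_id = {row[0]: row for row in rows_menus}
--
--     def chain(row):
--         path = [row[0]]
--         p = row[3]
--         while p is not None and p in menu_by_id and p not in path:
--             path.append(p)
--             p = menu_by_id[p][3]
--         return path
--
--     return {i for row in rows_menus if row[2] in menu_route_scope for i in chain(row)}
-- ===== Notes on version B (the rewrite author's own statement) =====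
-- stated objective: alternative
-- what changed: A marks visible ids incrementally in one pass, walking each scoped row's ancestors with an early stop at already-visible ids; B computes each scoped row's full ancestor chain independently (cycle-safe via a local path, no shared state) and combines the chains into one set.
import Mathlib
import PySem

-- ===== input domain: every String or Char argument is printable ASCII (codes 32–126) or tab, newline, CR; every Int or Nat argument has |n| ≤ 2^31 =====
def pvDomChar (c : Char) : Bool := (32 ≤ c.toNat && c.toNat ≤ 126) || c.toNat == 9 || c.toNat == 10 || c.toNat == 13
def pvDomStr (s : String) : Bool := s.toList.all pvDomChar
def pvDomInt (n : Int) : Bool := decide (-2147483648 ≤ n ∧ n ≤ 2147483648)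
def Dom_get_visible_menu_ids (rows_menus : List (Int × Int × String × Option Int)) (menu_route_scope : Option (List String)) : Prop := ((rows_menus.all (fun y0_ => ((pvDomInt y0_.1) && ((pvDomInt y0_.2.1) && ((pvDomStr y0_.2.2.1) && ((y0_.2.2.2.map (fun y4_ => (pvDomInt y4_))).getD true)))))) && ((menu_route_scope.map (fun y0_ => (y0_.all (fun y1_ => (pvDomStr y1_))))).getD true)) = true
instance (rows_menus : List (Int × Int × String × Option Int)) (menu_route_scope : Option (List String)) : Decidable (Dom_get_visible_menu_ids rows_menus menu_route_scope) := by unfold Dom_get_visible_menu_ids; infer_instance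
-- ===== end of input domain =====

-- B replaces A's single pass with a globally memoized, early-stopping ancestor walk by a pure
-- per-row ancestor-chain computation (cycle-safe via a local path) combined into one set
-- (objective: alternative decomposition, same result on menus with unique ids).

-- termination helper (cited by both ports' decreasing_by)
theorem pv_filter_len_lt (l : List Int) (p p' : Int → Bool) (q : Int)
    (hq : q ∈ l) (hpq : p q = true) (hp'q : p' q = false)
    (himp : ∀ x, p' x = true → p x = true) :
    (l.filter p').length < (l.filter p).length := by
  induction l with
  | nil => cases hq
  | cons a t ih =>
    by_cases haq : a = q
    · subst haq
      have hle : (t.filter p').length ≤ (t.filter p).length :=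
        List.Sublist.length_le (List.monotone_filter_right t (fun x hx => himp x hx))
      simp [hpq, hp'q]
      omega
    · have hq' : q ∈ t := by
        rcases List.mem_cons.mp hq with h | h
        · exact absurd h.symm haq
        · exact h
      have hlt := ih hq'
      cases hpa : p a <;> cases hp'a : p' a <;>
        simp [hpa, hp'a] <;> first
        | omega
        | exact absurd (himp a hp'a) (by simp [hpa])

-- ===== PORT A =====
-- menu_by_id = dict(); for row in rows_menus: menu_by_id[row[0]] = row
def pvMenuDict (rows_menus : List (Int × Int × String × Option Int)) :
    PySem.Dict Int (Int × Int × String × Option Int) :=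
  rows_menus.foldl (fun d row => d.insert row.1 row) PySem.Dict.empty

-- the inner 'while parent_menu_id is not None and parent_menu_id in menu_by_id
--            and parent_menu_id not in visible_menu_ids' loop
def pvWalkA (d : PySem.Dict Int (Int × Int × String × Option Int))
    (visible : PySem.Set Int) (p : Option Int) : PySem.Set Int :=
  match p with
  | none => visible
  | some q =>
    if hq : (d.get? q).isSome = true then
      if PySem.Set.contains visible q = true then visible
      else pvWalkA d (PySem.Set.add visible q) ((d.get? q).get hq).2.2.2
    else visible
termination_by ((d.keys.filter (fun k => !(PySem.Set.contains visible k))).length)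
decreasing_by
  rename_i hv
  apply pv_filter_len_lt _ _ _ q
  · by_contra hmem
    rw [(PySem.Dict.get?_eq_none_iff_not_mem_keys d q).mpr hmem] at hq
    exact absurd hq (by simp)
  · simp only [Bool.not_eq_true']
    cases hcq : PySem.Set.contains visible q with
    | false => rfl
    | true => exact absurd hcq hv
  · simp only [Bool.not_eq_false']
    exact (PySem.Set.contains_iff _ _).mpr ((PySem.Set.mem_add _ _ _).mpr (Or.inr rfl))
  · intro x hx
    simp only [Bool.not_eq_true'] at hx ⊢
    cases hcx : PySem.Set.contains visible x with
    | false => rfl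
    | true =>
      have h1 : (visible.add q).contains x = true :=
        (PySem.Set.contains_iff _ _).mpr
          ((PySem.Set.mem_add _ _ _).mpr (Or.inl ((PySem.Set.contains_iff _ _).mp hcx)))
      rw [hx] at h1
      exact absurd h1 (by simp)

def get_visible_menu_ids (rows_menus : List (Int × Int × String × Option Int)) (menu_route_scope : Option (List String)) : List Int :=
  match menu_route_scope with
  | none =>
    if rows_menus.isEmpty then PySem.Set.empty
    else PySem.Set.ofList (rows_menus.map (fun row => row.1))
  | some sc =>
    let d := pvMenuDict rows_menus
    rows_menus.foldl (fun visible row =>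
      if sc.contains row.2.2.1 then pvWalkA d (PySem.Set.add visible row.1) row.2.2.2
      else visible) PySem.Set.empty

-- ===== PORT B =====
-- the 'while p is not None and p in menu_by_id and p not in path' loop of chain(row)
def pvAncB (d : PySem.Dict Int (Int × Int × String × Option Int))
    (path : List Int) (p : Option Int) : List Int :=
  match p with
  | none => []
  | some q =>
    if hq : (d.get? q).isSome = true then
      if q ∈ path then []
      else q :: pvAncB d (path ++ [q]) ((d.get? q).get hq).2.2.2
    else []
termination_by ((d.keys.filter (fun k => !(path.contains k))).length)
decreasing_by
  rename_i hp
  apply pv_filter_len_lt _ _ _ q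
  · by_contra hmem
    rw [(PySem.Dict.get?_eq_none_iff_not_mem_keys d q).mpr hmem] at hq
    exact absurd hq (by simp)
  · simp [hp]
  · simp
  · intro x hx
    simp only [Bool.not_eq_true'] at hx ⊢
    simp only [List.contains_eq_mem, decide_eq_false_iff_not, List.mem_append,
      List.mem_singleton] at hx ⊢
    exact fun h => hx (Or.inl h)

def get_visible_menu_ids_alt (rows_menus : List (Int × Int × String × Option Int)) (menu_route_scope : Option (List String)) : List Int :=
  match menu_route_scope with
  | none => PySem.Set.ofList (rows_menus.map (fun row => row.1))
  | some sc =>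
    let d := pvMenuDict rows_menus
    PySem.Set.ofList
      ((rows_menus.filter (fun row => sc.contains row.2.2.1)).flatMap
        (fun row => row.1 :: pvAncB d [row.1] row.2.2.2))

-- ===== PRECONDITION & SPEC =====
-- Pre_ excludes scoped calls on menu lists with duplicate menu ids: there A's ancestor walk mixes a
-- stale duplicate row's parent with the dict's last-reinserted rows, an accidental choice B does not copy.
def Pre_get_visible_menu_ids (rows_menus : List (Int × Int × String × Option Int)) (menu_route_scope : Option (List String)) : Prop :=
  menu_route_scope = none ∨ (rows_menus.map (fun row => row.1)).Nodup
instance (rows_menus : List (Int × Int × String × Option Int)) (menu_route_scope : Option (List String)) : Decidable (Pre_get_visible_menu_ids rows_menus menu_route_scope) := by unfold Pre_get_visible_menu_ids; infer_instance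

def pvWitness_get_visible_menu_ids : (List (Int × Int × String × Option Int)) × Option (List String) :=
  ([(1, 0, "a", none), (2, 0, "b", some 1)], some ["b"])

def Spec_get_visible_menu_ids (rows_menus : List (Int × Int × String × Option Int)) (menu_route_scope : Option (List String)) (out : List Int) : Prop := out = get_visible_menu_ids_alt rows_menus menu_route_scope
instance (rows_menus : List (Int × Int × String × Option Int)) (menu_route_scope : Option (List String)) (out : List Int) : Decidable (Spec_get_visible_menu_ids rows_menus menu_route_scope out) := by unfold Spec_get_visible_menu_ids; infer_instance

-- ===== CLAIM (what is proved, stated in full; the proofs are below) =====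
def Claim_equal_get_visible_menu_ids : Prop := ∀ (rows_menus : List (Int × Int × String × Option Int)) (menu_route_scope : Option (List String)), Dom_get_visible_menu_ids rows_menus menu_route_scope → Pre_get_visible_menu_ids rows_menus menu_route_scope → Spec_get_visible_menu_ids rows_menus menu_route_scope (get_visible_menu_ids rows_menus menu_route_scope)

-- ===== LEMMAS AND PROOFS =====

-- visible sets produced by A are parent-closed
def pvClosed (d : PySem.Dict Int (Int × Int × String × Option Int)) (V : List Int) : Prop :=
  ∀ q ∈ V, ∀ r, d.get? q = some r → ∀ p, r.2.2.2 = some p → (d.get? p).isSome = true → p ∈ V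

theorem pv_update_of_subset {s : PySem.Set Int} {l : List Int} (h : ∀ x ∈ l, x ∈ s) :
    PySem.Set.update s l = s := by
  induction l generalizing s with
  | nil => rfl
  | cons a t ih =>
    rw [PySem.Set.update_cons, PySem.Set.add_of_mem (h a (by simp))]
    exact ih (fun x hx => h x (by simp [hx]))

-- every element of a chain started inside a closed set stays inside it
theorem pv_anc_subset (d : PySem.Dict Int (Int × Int × String × Option Int)) (V : List Int)
    (hV : pvClosed d V) (path : List Int) (p : Option Int)
    (hhead : ∀ q, p = some q → (d.get? q).isSome = true → q ∈ V) :
    ∀ x ∈ pvAncB d path p, x ∈ V := by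
  induction path, p using pvAncB.induct d with
  | case1 path => simp [pvAncB]
  | case2 path q hq hp =>
    rw [pvAncB, dif_pos hq, if_pos hp]
    simp
  | case3 path q hq hp ih =>
    intro x hx
    rw [pvAncB, dif_pos hq, if_neg hp] at hx
    rcases List.mem_cons.mp hx with rfl | hx
    · exact hhead x rfl hq
    · have hqV : q ∈ V := hhead q rfl hq
      refine ih (fun q' hp' hq' => ?_) x hx
      exact hV q hqV _ (Option.some_get hq).symm q' hp' hq'
  | case4 path q hq =>
    rw [pvAncB, dif_neg hq]
    simp

-- the parent of a chain element is on the path or in the chain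
theorem pv_anc_parent (d : PySem.Dict Int (Int × Int × String × Option Int))
    (path : List Int) (p : Option Int) :
    ∀ x ∈ pvAncB d path p, ∀ rx px, d.get? x = some rx → rx.2.2.2 = some px →
      (d.get? px).isSome = true → px ∈ path ∨ px ∈ pvAncB d path p := by
  induction path, p using pvAncB.induct d with
  | case1 path => simp [pvAncB]
  | case2 path q hq hp =>
    rw [pvAncB, dif_pos hq, if_pos hp]
    simp
  | case3 path q hq hp ih =>
    intro x hx rx px hgx hpx hsome
    rw [pvAncB, dif_pos hq, if_neg hp] at hx ⊢
    rcases List.mem_cons.mp hx with rfl | hx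
    · -- x = q : look one step into the tail chain
      have hrow : ((d.get? x).get hq) = rx :=
        Option.some_inj.mp ((Option.some_get hq).trans hgx)
      rw [hrow, hpx, pvAncB, dif_pos hsome]
      by_cases hmem : px ∈ path ++ [x]
      · rcases List.mem_append.mp hmem with h | h
        · exact Or.inl h
        · exact Or.inr (List.mem_cons.mpr (Or.inl (List.mem_singleton.mp h)))
      · rw [if_neg hmem]
        exact Or.inr (List.mem_cons.mpr (Or.inr List.mem_cons_self))
    · rcases ih x hx rx px hgx hpx hsome with h | h
      · rcases List.mem_append.mp h with h' | h'
        · exact Or.inl h'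
        · exact Or.inr (List.mem_cons.mpr (Or.inl (List.mem_singleton.mp h')))
      · exact Or.inr (List.mem_cons.mpr (Or.inr h))
  | case4 path q hq =>
    rw [pvAncB, dif_neg hq]
    simp

-- A's early-stopping walk over a closed set is B's local-path chain
theorem pv_walk_eq_anc (d : PySem.Dict Int (Int × Int × String × Option Int)) (V : List Int)
    (hV : pvClosed d V) (path : List Int) (p : Option Int) :
    pvWalkA d (PySem.Set.update V path) p = PySem.Set.update V (path ++ pvAncB d path p) := by
  induction path, p using pvAncB.induct d with
  | case1 path => rw [pvAncB, pvWalkA, List.append_nil]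
  | case2 path q hq hp =>
    have hc : PySem.Set.contains (PySem.Set.update V path) q = true :=
      (PySem.Set.contains_iff _ _).mpr ((PySem.Set.mem_update _ _ _).mpr (Or.inr hp))
    rw [pvAncB, dif_pos hq, if_pos hp, pvWalkA, dif_pos hq, if_pos hc, List.append_nil]
  | case3 path q hq hp ih =>
    rw [pvAncB, dif_pos hq, if_neg hp, pvWalkA, dif_pos hq]
    by_cases hqV : q ∈ V
    · -- A stops here; the rest of B's chain lies inside V
      have hc : PySem.Set.contains (PySem.Set.update V path) q = true :=
        (PySem.Set.contains_iff _ _).mpr ((PySem.Set.mem_update _ _ _).mpr (Or.inl hqV))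
      rw [if_pos hc]
      have hsub : ∀ x ∈ pvAncB d (path ++ [q]) ((d.get? q).get hq).2.2.2, x ∈ V := by
        refine pv_anc_subset d V hV (path ++ [q]) _ (fun q' hp' hq' => ?_)
        exact hV q hqV _ (Option.some_get hq).symm q' hp' hq'
      rw [List.append_cons, PySem.Set.update_append, PySem.Set.update_append,
        PySem.Set.update_cons, PySem.Set.update_nil,
        PySem.Set.add_of_mem ((PySem.Set.mem_update _ _ _).mpr (Or.inl hqV)),
        pv_update_of_subset (fun x hx => (PySem.Set.mem_update _ _ _).mpr (Or.inl (hsub x hx)))]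
    · have hc : PySem.Set.contains (PySem.Set.update V path) q = false := by
        cases hcq : PySem.Set.contains (PySem.Set.update V path) q with
        | false => rfl
        | true =>
          rcases (PySem.Set.mem_update _ _ _).mp ((PySem.Set.contains_iff _ _).mp hcq) with h | h
          · exact absurd h hqV
          · exact absurd h hp
      rw [if_neg (by simp only [hc]; simp)]
      have hadd : PySem.Set.add (PySem.Set.update V path) q = PySem.Set.update V (path ++ [q]) := by
        rw [PySem.Set.update_append, PySem.Set.update_cons, PySem.Set.update_nil]
      rw [hadd, ih]
      simp
  | case4 path q hq =>
    rw [pvAncB, dif_neg hq, pvWalkA, dif_neg hq, List.append_nil]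

-- closedness is preserved by processing one scoped row
theorem pv_closed_step (d : PySem.Dict Int (Int × Int × String × Option Int)) (V : List Int)
    (hV : pvClosed d V) (q0 : Int) (row0 : Int × Int × String × Option Int)
    (hrow0 : d.get? q0 = some row0) :
    pvClosed d (PySem.Set.update V (q0 :: pvAncB d [q0] row0.2.2.2)) := by
  intro x hx rx hgx px hpx hsome
  have hgoal : ∀ y, y ∈ V ∨ y = q0 ∨ y ∈ pvAncB d [q0] row0.2.2.2 →
      y ∈ PySem.Set.update V (q0 :: pvAncB d [q0] row0.2.2.2) := by
    intro y hy
    refine (PySem.Set.mem_update _ _ _).mpr ?_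
    rcases hy with h | h | h
    · exact Or.inl h
    · exact Or.inr (by simp [h])
    · exact Or.inr (by simp [h])
  rcases (PySem.Set.mem_update _ _ _).mp hx with hxV | hxC
  · exact hgoal px (Or.inl (hV x hxV rx hgx px hpx hsome))
  · rcases List.mem_cons.mp hxC with rfl | hxA
    · -- x = q0 : its parent is the head of the chain (or q0 itself)
      have hrx : rx = row0 := by rw [hgx] at hrow0; exact Option.some_inj.mp hrow0
      subst hrx
      by_cases hpq : px = x
      · exact hgoal px (Or.inr (Or.inl hpq))
      · refine hgoal px (Or.inr (Or.inr ?_))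
        rw [hpx, pvAncB, dif_pos hsome]
        have : ¬ px ∈ ([x] : List Int) := by simp [hpq]
        rw [if_neg this]
        exact List.mem_cons_self
    · rcases pv_anc_parent d [q0] row0.2.2.2 x hxA rx px hgx hpx hsome with h | h
      · exact hgoal px (Or.inr (Or.inl (List.mem_singleton.mp h)))
      · exact hgoal px (Or.inr (Or.inr h))

-- A's whole fold over the rows, from any closed set
theorem pv_fold_eq (d : PySem.Dict Int (Int × Int × String × Option Int)) (sc : List String) :
    ∀ (rows' : List (Int × Int × String × Option Int)) (V : List Int), pvClosed d V →
    (∀ r ∈ rows', d.get? r.1 = some r) →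
    rows'.foldl (fun visible row =>
      if sc.contains row.2.2.1 then pvWalkA d (PySem.Set.add visible row.1) row.2.2.2
      else visible) V
    = PySem.Set.update V ((rows'.filter (fun row => sc.contains row.2.2.1)).flatMap
        (fun row => row.1 :: pvAncB d [row.1] row.2.2.2)) := by
  intro rows'
  induction rows' with
  | nil => intro V _ _; simp [PySem.Set.update_nil]
  | cons r rows'' ih =>
    intro V hV hrows
    by_cases hsc : sc.contains r.2.2.1
    · have hstep : pvWalkA d (PySem.Set.add V r.1) r.2.2.2
          = PySem.Set.update V (r.1 :: pvAncB d [r.1] r.2.2.2) := by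
        have := pv_walk_eq_anc d V hV [r.1] r.2.2.2
        rwa [PySem.Set.update_cons, PySem.Set.update_nil, List.singleton_append] at this
      simp only [List.foldl_cons, List.filter_cons, hsc, if_true, List.flatMap_cons, hstep]
      rw [ih _ (pv_closed_step d V hV r.1 r (hrows r (by simp)))
        (fun r' hr' => hrows r' (by simp [hr'])), PySem.Set.update_append]
    · simp only [List.foldl_cons, List.filter_cons, hsc, if_false, Bool.false_eq_true]
      exact ih V hV (fun r' hr' => hrows r' (by simp [hr']))

-- with unique ids the dict maps every row's id back to that row
theorem pv_dict_get (rows : List (Int × Int × String × Option Int))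
    (hnd : (rows.map (fun row => row.1)).Nodup) :
    ∀ r ∈ rows, (pvMenuDict rows).get? r.1 = some r := by
  intro r hr
  have hitems : (rows.foldl (fun d row => d.insert row.1 row)
        (PySem.Dict.empty : PySem.Dict Int (Int × Int × String × Option Int))).items
      = PySem.Dict.empty.items ++ rows.map (fun r => (r.1, r)) :=
    PySem.Dict.items_foldl_insert_fresh rows (fun r => r.1) (fun r => r) PySem.Dict.empty
      (fun a _ => PySem.Dict.contains_empty a.1) hnd
  refine PySem.Dict.get?_of_mem_items (pvMenuDict rows) ?_ ?_
  · unfold pvMenuDict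
    rw [hitems]
    exact List.mem_append.mpr (Or.inr (List.mem_map.mpr ⟨r, hr, rfl⟩))
  · have h : (rows.foldl (fun d row => d.insert row.1 row)
        (PySem.Dict.empty : PySem.Dict Int (Int × Int × String × Option Int))).keys.Nodup :=
      PySem.Dict.nodup_keys_foldl_insert_key rows (fun r => r.1) (fun _ r => r)
        PySem.Dict.empty PySem.Dict.nodup_keys_empty
    exact h

-- ===== VERDICT (by name: the statement is the Claim_ definition above) =====
theorem get_visible_menu_ids_spec : Claim_equal_get_visible_menu_ids := by
  intro rows scope _hdom hpre
  unfold Spec_get_visible_menu_ids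
  cases scope with
  | none =>
    cases rows with
    | nil => rfl
    | cons r t => simp [get_visible_menu_ids, get_visible_menu_ids_alt]
  | some sc =>
    have hnd : (rows.map (fun row => row.1)).Nodup := by
      rcases hpre with h | h
      · exact absurd h (by simp)
      · exact h
    have hclosed : pvClosed (pvMenuDict rows) [] := by intro q hq; cases hq
    simp only [get_visible_menu_ids, get_visible_menu_ids_alt]
    rw [pv_fold_eq (pvMenuDict rows) sc rows PySem.Set.empty hclosed (pv_dict_get rows hnd)]
    rfl
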